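-- pv_equiv track=rewrite | github.com/Parthkk90/Gost-Protocol | esp32-pni/validate_pni.py | analyze_entropy
-- ===== SOURCE A (Python) =====
-- def analyze_entropy(pni_hex):
--     """Basic entropy analysis"""
--     # Character distribution
--     char_counts = {}
--     for c in pni_hex.lower():
--         char_counts[c] = char_counts.get(c, 0) + 1
--
--     # Check for obvious patterns
--     if any(count > 10 for count in char_counts.values()):
--         return False, "Suspicious character repetition"
--
--     # Check for sequential patterns
--     for i in range(len(pni_hex) - 4):
--         if pni_hex[i:i+5] == pni_hex[i]*5:
--             return False, f"Pattern detected: {pni_hex[i]*5}"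
--
--     return True, "Good entropy distribution"
-- ===== SOURCE B (Python) =====
-- def analyze_entropy(pni_hex):
--     """Basic entropy analysis (alternative implementation: per-distinct-char count + run-length scan)"""
--     low = pni_hex.lower()
--     # Phase 1: any character occurring more than 10 times (case-insensitive)?
--     if any(low.count(c) > 10 for c in set(low)):
--         return False, "Suspicious character repetition"
--     # Phase 2: single pass tracking the length of the current run of equal characters
--     run = 1
--     for j in range(1, len(pni_hex)):
--         if pni_hex[j] == pni_hex[j - 1]:
--             run += 1
--             if run == 5:
--                 return False, "Pattern detected: " + pni_hex[j] * 5
--         else: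
--             run = 1
--     return True, "Good entropy distribution"
-- ===== Notes on version B (the rewrite author's own statement) =====
-- stated objective: alternative
-- what changed: Phase 1 replaces the hand-built counting dict with a direct per-distinct-character count over a set; phase 2 replaces the windowed slice comparison pni_hex[i:i+5] == pni_hex[i]*5 with a single run-length scan that tracks the length of the current run of equal characters.
import Mathlib
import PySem

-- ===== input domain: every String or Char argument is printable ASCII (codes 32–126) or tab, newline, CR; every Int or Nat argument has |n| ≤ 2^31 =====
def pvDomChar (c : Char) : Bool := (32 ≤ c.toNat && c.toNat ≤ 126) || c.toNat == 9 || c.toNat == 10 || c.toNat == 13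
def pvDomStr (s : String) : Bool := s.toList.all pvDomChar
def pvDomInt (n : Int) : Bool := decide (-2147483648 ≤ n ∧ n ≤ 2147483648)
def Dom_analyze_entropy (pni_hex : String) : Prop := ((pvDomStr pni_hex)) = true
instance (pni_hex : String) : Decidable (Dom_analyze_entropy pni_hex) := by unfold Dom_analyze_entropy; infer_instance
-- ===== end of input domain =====

-- B is an alternative implementation: phase 1 counts each distinct character directly
-- (set + count) instead of building a counter dict; phase 2 is a single run-length scan
-- instead of the windowed slice comparison. Same return value on every input.


-- ===== PORT A =====
-- 'for i in range(len(pni_hex) - 4): if pni_hex[i:i+5] == pni_hex[i]*5: return …'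
-- (indices produced by range are always in bounds, so pyGetD's default is never hit)
def aPatternLoop (cs : List Char) : List Int → Bool × String
  | [] => (true, "Good entropy distribution")
  | i :: rest =>
    if PySem.List.slice cs (some i) (some (i + 5)) =
       PySem.List.pyRepeat [PySem.List.pyGetD cs i ' '] 5 then
      (false, "Pattern detected: " ++ String.ofList (PySem.List.pyRepeat [PySem.List.pyGetD cs i ' '] 5))
    else aPatternLoop cs rest

def analyze_entropy (pni_hex : String) : Bool × String :=
  let char_counts :=
    (PySem.Str.lower pni_hex).toList.foldl
      (fun d c => d.insert c (d.getD c 0 + 1)) (PySem.Dict.empty : PySem.Dict Char Int)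
  if char_counts.values.any (fun count => decide (10 < count)) then
    (false, "Suspicious character repetition")
  else
    aPatternLoop pni_hex.toList
      (PySem.List.pyRange 0 ((pni_hex.toList.length : Int) - 4) 1)

-- ===== PORT B =====
-- 'for j in range(1, len(pni_hex)): …' tracking the current run length
def bRunLoop (cs : List Char) (run : Int) : List Int → Bool × String
  | [] => (true, "Good entropy distribution")
  | j :: rest =>
    if PySem.List.pyGetD cs j ' ' = PySem.List.pyGetD cs (j - 1) ' ' then
      if run + 1 = 5 then
        (false, "Pattern detected: " ++ String.ofList (PySem.List.pyRepeat [PySem.List.pyGetD cs j ' '] 5))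
      else bRunLoop cs (run + 1) rest
    else bRunLoop cs 1 rest

-- 'low.count(c)' for a single character c is exactly List.count on the code points
def analyze_entropy_alt (pni_hex : String) : Bool × String :=
  let low := (PySem.Str.lower pni_hex).toList
  if (PySem.Set.ofList low).any (fun c => decide (10 < (low.count c : Int))) then
    (false, "Suspicious character repetition")
  else
    bRunLoop pni_hex.toList 1
      (PySem.List.pyRange 1 (pni_hex.toList.length : Int) 1)

-- ===== PRECONDITION & SPEC =====
def Spec_analyze_entropy (pni_hex : String) (out : Bool × String) : Prop := out = analyze_entropy_alt pni_hex
instance (pni_hex : String) (out : Bool × String) : Decidable (Spec_analyze_entropy pni_hex out) := by unfold Spec_analyze_entropy; infer_instance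

-- ===== CLAIM (what is proved, stated in full; the proofs are below) =====
def Claim_equal_analyze_entropy : Prop := ∀ (pni_hex : String), Dom_analyze_entropy pni_hex → Spec_analyze_entropy pni_hex (analyze_entropy pni_hex)

-- ===== LEMMAS AND PROOFS =====

-- canonical form of phase 2: the first character starting a run of five equal characters
def firstRun5 : List Char → Option Char
  | [] => none
  | c :: rest => if rest.take 4 = List.replicate 4 c then some c else firstRun5 rest

def phase2Out : Option Char → Bool × String
  | none => (true, "Good entropy distribution")
  | some c => (false, "Pattern detected: " ++ String.ofList (List.replicate 5 c))

-- the run-length scan, stated structurally: previous char, current run, remaining chars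
def brSpec : Char → Int → List Char → Option Char
  | _, _, [] => none
  | p, r, c :: rest => if c = p then (if r + 1 = 5 then some c else brSpec c (r + 1) rest) else brSpec c 1 rest

theorem firstRun5_short (cs : List Char) (h : cs.length ≤ 4) : firstRun5 cs = none := by
  induction cs with
  | nil => rfl
  | cons c rest ih =>
    have hne : ¬ (rest.take 4 = List.replicate 4 c) := by
      intro he
      have := congrArg List.length he
      simp at this h
      omega
    rw [firstRun5, if_neg hne]
    exact ih (by simp at h; omega)

-- no run of five can start inside at most four copies of p followed by a different char
theorem firstRun5_skip (p c : Char) (rest : List Char) (r : Nat) (hr : r ≤ 4) (hne : c ≠ p) :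
    firstRun5 (List.replicate r p ++ c :: rest) = firstRun5 (c :: rest) := by
  induction r with
  | zero => simp
  | succ s ih =>
    have hs : s < 4 := by omega
    have hcond : ¬ ((List.replicate s p ++ c :: rest).take 4 = List.replicate 4 p) := by
      intro he
      have h1 : (List.replicate s p ++ c :: rest)[s]? = some c := by
        rw [List.getElem?_append_right (by simp)]
        simp
      have h2 := congrArg (fun l => l[s]?) he
      simp only [List.getElem?_take, hs, if_pos, h1, List.getElem?_replicate] at h2
      simp at h2
      exact hne h2
    rw [List.replicate_succ, List.cons_append, firstRun5, if_neg hcond]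
    exact ih (by omega)

theorem aLoop_shift (c : Char) (cs : List Char) (is : List Int) (h : ∀ i ∈ is, 0 ≤ i) :
    aPatternLoop (c :: cs) (is.map (· + 1)) = aPatternLoop cs is := by
  induction is with
  | nil => rfl
  | cons i rest ih =>
    have h0 : 0 ≤ i := h i (List.mem_cons_self ..)
    obtain ⟨n, rfl⟩ := Int.eq_ofNat_of_zero_le h0
    have e2 : ((n : Int) + 1 + 5 : Int) = ((n + 6 : Nat) : Int) := by push_cast; ring
    have e3 : ((n : Int) + 5 : Int) = ((n + 5 : Nat) : Int) := by push_cast; ring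
    have e1 : ((n : Int) + 1 : Int) = ((n + 1 : Nat) : Int) := by push_cast; ring
    simp only [List.map_cons, aPatternLoop]
    rw [e2, e3, e1, PySem.List.slice_natCast, PySem.List.slice_natCast,
        PySem.List.pyGetD_natCast, PySem.List.pyGetD_natCast]
    simp only [List.drop_succ_cons, List.getD_cons_succ]
    have hd : n + 6 - (n + 1) = 5 := by omega
    have hd2 : n + 5 - n = 5 := by omega
    rw [hd, hd2]
    split
    · rfl
    · exact ih (fun j hj => h j (List.mem_cons_of_mem _ hj))

theorem aLoop_short (cs : List Char) (h : cs.length ≤ 4) :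
    aPatternLoop cs (PySem.List.pyRange 0 ((cs.length : Int) - 4) 1) = phase2Out (firstRun5 cs) := by
  have hr : PySem.List.pyRange 0 ((cs.length : Int) - 4) 1 = [] := by
    rw [PySem.List.pyRange_of_pos _ _ (by norm_num), if_neg (by omega)]
    simp
  rw [hr, firstRun5_short cs h]
  rfl

theorem aLoop_eq_firstRun5 (cs : List Char) :
    aPatternLoop cs (PySem.List.pyRange 0 ((cs.length : Int) - 4) 1) = phase2Out (firstRun5 cs) := by
  induction cs with
  | nil => exact aLoop_short [] (by simp)
  | cons c cs' ih =>
    by_cases hlen : (c :: cs').length ≤ 4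
    · exact aLoop_short _ hlen
    · have h4 : 4 ≤ cs'.length := by simp at hlen ⊢; omega
      have hk : ((c :: cs').length : Int) - 4 = ((cs'.length - 3 : Nat) : Int) := by
        simp; omega
      have hk2 : cs'.length - 3 = (cs'.length - 4) + 1 := by omega
      rw [hk, PySem.List.pyRange_zero_natCast, hk2, List.range_succ_eq_map]
      simp only [List.map_cons, List.map_map, Function.comp_def, Nat.succ_eq_add_one,
        Nat.cast_add, Nat.cast_one, Nat.cast_zero]
      rw [show (fun (x : Nat) => (x : Int) + 1) = ((fun i => i + 1) ∘ (fun (x : Nat) => (x : Int))) from rfl,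
        ← List.map_map]
      rw [aPatternLoop]
      simp only [show (0:Int) + 5 = (5:Int) from rfl, PySem.List.slice_zero_start]
      rw [PySem.List.slice_to (c :: cs') (by norm_num : (0:Int) ≤ 5), PySem.List.pyGetD_zero_cons]
      simp only [PySem.List.pyRepeat_singleton]
      norm_num
      simp only [show Int.toNat 5 = 5 from rfl]
      by_cases hc : cs'.take 4 = List.replicate 4 c
      · rw [if_pos]
        · rw [firstRun5, if_pos hc]
          rfl
        · rw [show List.take 5 (c :: cs') = c :: List.take 4 cs' from rfl,
              show List.replicate 5 c = c :: List.replicate 4 c from rfl, hc]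
      · rw [if_neg, ← List.map_map, aLoop_shift c cs' _ (by simp)]
        · have hb : ((cs'.length : Int) - 4) = ((cs'.length - 4 : Nat) : Int) := by omega
          rw [hb, PySem.List.pyRange_zero_natCast] at ih
          rw [ih, firstRun5, if_neg hc]
        · rw [show List.take 5 (c :: cs') = c :: List.take 4 cs' from rfl,
              show List.replicate 5 c = c :: List.replicate 4 c from rfl]
          intro he
          rw [List.cons.injEq] at he
          exact hc he.2

theorem bLoop_eq_brSpec (rest : List Char) : ∀ (pre : List Char) (p : Char) (run : Int),
    bRunLoop (pre ++ p :: rest) run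
        (PySem.List.pyRange ((pre.length : Int) + 1) ((pre.length : Int) + 1 + rest.length) 1)
      = phase2Out (brSpec p run rest) := by
  induction rest with
  | nil =>
    intro pre p run
    have hr : PySem.List.pyRange ((pre.length : Int) + 1) ((pre.length : Int) + 1 + 0) 1 = [] := by
      rw [PySem.List.pyRange_of_pos _ _ (by norm_num), if_neg (by omega)]
      simp
    simp only [List.length_nil, Nat.cast_zero] at hr ⊢
    rw [hr]
    rfl
  | cons c rest' ih =>
    intro pre p run
    have hlt : ((pre.length : Int) + 1) < ((pre.length : Int) + 1 + (c :: rest').length) := by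
      simp only [List.length_cons]; push_cast; omega
    rw [PySem.List.pyRange_one_cons hlt, bRunLoop]
    have hget1 : PySem.List.pyGetD (pre ++ p :: c :: rest') ((pre.length : Int) + 1) ' ' = c := by
      rw [show ((pre.length : Int) + 1) = ((pre.length + 1 : Nat) : Int) by push_cast; ring,
          PySem.List.pyGetD_natCast]
      rw [List.getD_eq_getElem?_getD, List.getElem?_append_right (by omega)]
      simp
    have hget0 : PySem.List.pyGetD (pre ++ p :: c :: rest') ((pre.length : Int) + 1 - 1) ' ' = p := by
      rw [show ((pre.length : Int) + 1 - 1) = ((pre.length : Nat) : Int) by ring,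
          PySem.List.pyGetD_natCast]
      rw [List.getD_eq_getElem?_getD, List.getElem?_append_right (by omega)]
      simp
    rw [hget1, hget0]
    by_cases hcp : c = p
    · rw [if_pos hcp]
      by_cases h5 : run + 1 = 5
      · rw [if_pos h5, brSpec]
        rw [if_pos hcp, if_pos h5]
        rfl
      · rw [if_neg h5]
        have := ih (pre ++ [p]) c (run + 1)
        rw [List.length_append, List.length_singleton] at this
        rw [show pre ++ p :: c :: rest' = (pre ++ [p]) ++ c :: rest' by simp,
            show ((pre.length : Int) + 1 + (c :: rest').length) = (((pre.length + 1 : Nat) : Int) + 1 + rest'.length) by simp; ring,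
            show ((pre.length : Int) + 1 + 1) = (((pre.length + 1 : Nat) : Int) + 1) by push_cast; ring]
        rw [this, brSpec, if_pos hcp, if_neg h5]
    · rw [if_neg hcp]
      have := ih (pre ++ [p]) c 1
      rw [List.length_append, List.length_singleton] at this
      rw [show pre ++ p :: c :: rest' = (pre ++ [p]) ++ c :: rest' by simp,
          show ((pre.length : Int) + 1 + (c :: rest').length) = (((pre.length + 1 : Nat) : Int) + 1 + rest'.length) by simp; ring,
          show ((pre.length : Int) + 1 + 1) = (((pre.length + 1 : Nat) : Int) + 1) by push_cast; ring]
      rw [this, brSpec, if_neg hcp]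

theorem brSpec_eq_firstRun5 (rest : List Char) : ∀ (p : Char) (run : Int), 1 ≤ run → run ≤ 4 →
    brSpec p run rest = firstRun5 (List.replicate run.toNat p ++ rest) := by
  induction rest with
  | nil =>
    intro p run h1 h4
    rw [show brSpec p run [] = none from rfl,
        firstRun5_short _ (by simp; omega)]
  | cons c rest' ih =>
    intro p run h1 h4
    by_cases hcp : c = p
    · subst hcp
      by_cases h5 : run + 1 = 5
      · have hrun : run = 4 := by omega
        subst hrun
        rw [brSpec, if_pos rfl, if_pos h5]
        rw [show Int.toNat 4 = 4 from rfl,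
            show List.replicate 4 c ++ c :: rest' = c :: (c :: c :: c :: c :: rest') from rfl,
            firstRun5, if_pos (by rfl)]
      · rw [brSpec, if_pos rfl, if_neg h5]
        have ht : (run + 1).toNat = run.toNat + 1 := by omega
        rw [ih c (run + 1) (by omega) (by omega), ht, List.replicate_succ',
            List.append_assoc, List.singleton_append]
    · rw [brSpec, if_neg hcp]
      rw [ih c 1 le_rfl (by norm_num),
          firstRun5_skip p c rest' run.toNat (by omega) hcp]
      rfl

theorem bLoop_eq_firstRun5 (cs : List Char) :
    bRunLoop cs 1 (PySem.List.pyRange 1 (cs.length : Int) 1) = phase2Out (firstRun5 cs) := by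
  cases cs with
  | nil =>
    rw [show PySem.List.pyRange 1 ((List.length ([] : List Char) : Int)) 1 = [] by
      rw [PySem.List.pyRange_of_pos _ _ (by norm_num), if_neg (by simp)]
      simp]
    rfl
  | cons c cs' =>
    have h := bLoop_eq_brSpec cs' [] c 1
    simp only [List.length_nil, Nat.cast_zero, List.nil_append, zero_add] at h
    rw [show ((c :: cs').length : Int) = 1 + cs'.length by simp; ring, h,
        brSpec_eq_firstRun5 cs' c 1 le_rfl (by norm_num)]
    rfl

theorem phase1_eq (low : List Char) :
    ((low.foldl (fun d c => d.insert c (d.getD c 0 + 1)) (PySem.Dict.empty : PySem.Dict Char Int)).values.any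
        (fun count => decide (10 < count)))
      = (PySem.Set.ofList low).any (fun c => decide (10 < (low.count c : Int))) := by
  rw [PySem.Dict.foldl_insert_getD_add_one_eq_counter]
  simp [PySem.Dict.values, PySem.Dict.items_counter, List.any_map]
  simp [Function.comp_def]

-- ===== VERDICT (by name: the statement is the Claim_ definition above) =====
theorem analyze_entropy_spec : Claim_equal_analyze_entropy := by
  intro s _
  unfold Spec_analyze_entropy analyze_entropy analyze_entropy_alt
  simp only
  rw [phase1_eq]
  split_ifs
  · rfl
  · rw [aLoop_eq_firstRun5, bLoop_eq_firstRun5]
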